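-- pv_equiv track=rewrite | github.com/zhangxinfang520/suanfa | base/0_从右下角开始按照对角线的方式打印输出.py | printpath
-- ===== SOURCE A (Python) =====
-- def printpath(nums):
--     m,n = len(nums),len(nums[0])
--     res = []
--     for row in list(range(m+n-1)):
--         #反转元素的开始位置
--         ret_count = len(res)
--         i = row if row+1 <=m else m-1
--         j = n - 1 if row + 1 <= m else (m + n - 1) - row - 1
--         # 获取每条对角线上的元素
--
--         while i >= 0 and j >= 0:
--             res.append(nums[i][j])
--             i -= 1
--             j -= 1
--       # 奇数行顺序反转
--         if row % 2 == 0: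
--             res = res[:ret_count] + res[ret_count:][::-1]
--     return res
-- ===== SOURCE B (Python) =====
-- def printpath(nums):
--     m, n = len(nums), len(nums[0])
--     buckets = {}
--     for i in range(m):
--         for j in range(n):
--             k = i - j
--             buckets[k] = buckets.get(k, []) + [nums[i][j]]
--     res = []
--     for r in range(m + n - 1):
--         seg = buckets.get(r - (n - 1), [])
--         if r % 2 == 1:
--             seg = seg[::-1]
--         res = res + seg
--     return res
-- ===== Notes on version B (the rewrite author's own statement) =====
-- stated objective: alternative
-- what changed: A walks each diagonal separately from its bottom-right start cell with a while loop and reverses the even segments in place; B makes one row-major pass bucketing every cell into a dict keyed by i-j, then concatenates the buckets per diagonal, reversing the odd ones.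
import Mathlib
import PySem

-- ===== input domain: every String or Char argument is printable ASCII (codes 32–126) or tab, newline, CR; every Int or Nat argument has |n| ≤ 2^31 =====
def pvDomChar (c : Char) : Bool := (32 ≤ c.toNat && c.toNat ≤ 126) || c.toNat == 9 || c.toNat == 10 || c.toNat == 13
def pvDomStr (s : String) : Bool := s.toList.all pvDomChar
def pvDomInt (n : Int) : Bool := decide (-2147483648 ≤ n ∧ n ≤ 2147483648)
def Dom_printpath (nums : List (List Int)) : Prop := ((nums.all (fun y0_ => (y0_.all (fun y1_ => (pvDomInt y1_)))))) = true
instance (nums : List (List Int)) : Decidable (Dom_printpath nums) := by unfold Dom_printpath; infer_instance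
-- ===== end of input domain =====

-- B replaces A's per-diagonal down-walks by one row-major pass into dict buckets keyed by i - j,
-- then concatenates the buckets (reversed on odd diagonals): a different decomposition (objective: alternative).

-- ===== PORT A =====
-- nums[i][j]; under Pre_ both indices are in range, so the defaults are never taken
def pvGet (nums : List (List Int)) (i j : Int) : Int :=
  PySem.List.pyGetD (PySem.List.pyGetD nums i []) j 0

-- A's inner 'while i >= 0 and j >= 0' loop appending to res
def pvAwalk (nums : List (List Int)) (i j : Int) (res : List Int) : List Int :=
  if 0 ≤ i ∧ 0 ≤ j then pvAwalk nums (i - 1) (j - 1) (res ++ [pvGet nums i j]) else res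
termination_by (i + 1).toNat
decreasing_by all_goals omega

def printpath (nums : List (List Int)) : List Int :=
  let m : Int := (nums.length : Int)
  -- len(nums[0]): raises IndexError on empty nums (excluded by Pre_); default [] outside Pre_
  let n : Int := ((PySem.List.pyGetD nums 0 []).length : Int)
  (PySem.List.pyRange 0 (m + n - 1) 1).foldl (fun res row =>
    let ret_count := res.length
    let i : Int := if row + 1 ≤ m then row else m - 1
    let j : Int := if row + 1 ≤ m then n - 1 else m + n - 1 - row - 1
    let res2 := pvAwalk nums i j res
    -- res[:ret_count] + res[ret_count:][::-1] with 0 ≤ ret_count ≤ len(res): exactly take/drop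
    if row % 2 = 0 then res2.take ret_count ++ (res2.drop ret_count).reverse else res2) []

-- ===== PORT B =====
-- buckets[k] = buckets.get(k, []) + [nums[i][j]] over all cells, row-major
def pvBuckets (nums : List (List Int)) (m n : Int) : PySem.Dict Int (List Int) :=
  (PySem.List.pyRange 0 m 1).foldl (fun d i =>
    (PySem.List.pyRange 0 n 1).foldl (fun d j =>
      d.modify (i - j) [] (fun l => l ++ [pvGet nums i j])) d) PySem.Dict.empty

def printpath_alt (nums : List (List Int)) : List Int :=
  let m : Int := (nums.length : Int)
  let n : Int := ((PySem.List.pyGetD nums 0 []).length : Int)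
  let buckets := pvBuckets nums m n
  (PySem.List.pyRange 0 (m + n - 1) 1).foldl (fun res r =>
    let seg := buckets.getD (r - (n - 1)) []
    let seg := if r % 2 = 1 then seg.reverse else seg
    res ++ seg) []

-- ===== PRECONDITION & SPEC =====
-- Pre_ excludes exactly the inputs where both Pythons raise IndexError: empty nums
-- (len(nums[0])) and matrices with some row shorter than row 0 (nums[i][j] out of range).
def Pre_printpath (nums : List (List Int)) : Prop :=
  nums ≠ [] ∧ ∀ row ∈ nums, (nums.headD []).length ≤ row.length
instance (nums : List (List Int)) : Decidable (Pre_printpath nums) := by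
  unfold Pre_printpath; infer_instance
def pvWitness_printpath : List (List Int) := [[1, 2, 3], [4, 5, 6], [7, 8, 9]]

def Spec_printpath (nums : List (List Int)) (out : List Int) : Prop := out = printpath_alt nums
instance (nums : List (List Int)) (out : List Int) : Decidable (Spec_printpath nums out) := by unfold Spec_printpath; infer_instance

-- ===== CLAIM (what is proved, stated in full; the proofs are below) =====
def Claim_equal_printpath : Prop := ∀ (nums : List (List Int)), Dom_printpath nums → Pre_printpath nums → Spec_printpath nums (printpath nums)

-- ===== LEMMAS AND PROOFS =====

-- the diagonal with constant i - j = c, listed in increasing i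
def pvDiag (nums : List (List Int)) (c lo hi : Int) : List Int :=
  (PySem.List.pyRange lo hi 1).map (fun i => pvGet nums i (i - c))

-- A's per-row segment (the walk, reversed on even rows) and B's per-row segment (the bucket,
-- reversed on odd rows)
def pvSegA (nums : List (List Int)) (m n row : Int) : List Int :=
  let i : Int := if row + 1 ≤ m then row else m - 1
  let j : Int := if row + 1 ≤ m then n - 1 else m + n - 1 - row - 1
  let w := pvAwalk nums i j []
  if row % 2 = 0 then w.reverse else w

def pvSegB (nums : List (List Int)) (m n r : Int) : List Int :=
  let seg := (pvBuckets nums m n).getD (r - (n - 1)) []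
  if r % 2 = 1 then seg.reverse else seg

-- the accumulator of A's walk splits off
theorem pvAwalk_append (nums : List (List Int)) (i j : Int) (res : List Int) :
    pvAwalk nums i j res = res ++ pvAwalk nums i j [] := by
  by_cases h : 0 ≤ i ∧ 0 ≤ j
  · have h1 : pvAwalk nums i j res = pvAwalk nums (i - 1) (j - 1) (res ++ [pvGet nums i j]) := by
      rw [pvAwalk, if_pos h]
    have h2 : pvAwalk nums i j [] = pvAwalk nums (i - 1) (j - 1) ([] ++ [pvGet nums i j]) := by
      rw [pvAwalk, if_pos h]
    rw [h1, h2, pvAwalk_append nums (i - 1) (j - 1) (res ++ [pvGet nums i j]),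
      pvAwalk_append nums (i - 1) (j - 1) ([] ++ [pvGet nums i j])]
    simp
  · rw [pvAwalk, if_neg h, pvAwalk, if_neg h]
    simp
termination_by (i + 1).toNat
decreasing_by all_goals omega

-- A's walk down diagonal c starting at row i is the reversed increasing diagonal
theorem pvAwalk_eq_diag (nums : List (List Int)) (c : Int) (i : Int) :
    pvAwalk nums i (i - c) [] = (pvDiag nums c (max c 0) (i + 1)).reverse := by
  by_cases h : 0 ≤ i ∧ 0 ≤ i - c
  · rw [pvAwalk, if_pos h, pvAwalk_append,
      show i - c - 1 = i - 1 - c from by ring, pvAwalk_eq_diag nums c (i - 1)]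
    unfold pvDiag
    rw [PySem.List.pyRange_one_succ_right (show max c 0 ≤ i from by omega)]
    simp [show i - 1 + 1 = i from by ring]
  · rw [pvAwalk, if_neg h]
    unfold pvDiag
    rw [PySem.List.pyRange_one_eq_nil (by omega)]
    simp
termination_by (i + 1).toNat
decreasing_by all_goals omega

-- a range filtered to a single value
theorem filter_pyRange_eq_single (t : Int) : ∀ a b : Int,
    (PySem.List.pyRange a b 1).filter (fun j => j == t) =
      if a ≤ t ∧ t < b then [t] else [] := by
  intro a b
  by_cases hab : b ≤ a
  · rw [PySem.List.pyRange_one_eq_nil hab, List.filter_nil, if_neg (by omega)]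
  · rw [PySem.List.pyRange_one_cons (by omega), List.filter_cons,
      filter_pyRange_eq_single t (a + 1) b]
    by_cases hat : a = t
    · subst hat
      rw [if_neg (show ¬(a + 1 ≤ a ∧ a < b) from by omega),
        if_pos (show a ≤ a ∧ a < b from ⟨le_refl a, by omega⟩)]
      simp
    · have hb : (a == t) = false := beq_eq_false_iff_ne.mpr hat
      simp only [hb, Bool.false_eq_true, if_false]
      by_cases h2 : a + 1 ≤ t ∧ t < b
      · rw [if_pos h2, if_pos (by omega)]
      · rw [if_neg h2, if_neg (by omega)]
termination_by a b => (b - a).toNat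
decreasing_by all_goals omega

-- flattening per-row singleton contributions of diagonal c gives the increasing diagonal
theorem flatMap_if_eq_diag (nums : List (List Int)) (c hi : Int) : ∀ a b : Int,
    (PySem.List.pyRange a b 1).flatMap
        (fun i => if c ≤ i ∧ i < hi then [pvGet nums i (i - c)] else []) =
      pvDiag nums c (max a c) (min b hi) := by
  intro a b
  by_cases hab : b ≤ a
  · rw [PySem.List.pyRange_one_eq_nil hab]
    unfold pvDiag
    rw [PySem.List.pyRange_one_eq_nil (by omega)]
    simp
  · rw [PySem.List.pyRange_one_cons (by omega), List.flatMap_cons,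
      flatMap_if_eq_diag nums c hi (a + 1) b]
    by_cases h1 : c ≤ a ∧ a < hi
    · rw [if_pos h1]
      unfold pvDiag
      rw [show max a c = a from by omega,
        PySem.List.pyRange_one_cons (show a < min b hi from by omega),
        show max (a + 1) c = a + 1 from by omega]
      simp
    · rw [if_neg h1]
      by_cases h2 : hi ≤ a
      · unfold pvDiag
        rw [PySem.List.pyRange_one_eq_nil (show min b hi ≤ max (a + 1) c from by omega),
          PySem.List.pyRange_one_eq_nil (show min b hi ≤ max a c from by omega)]
        simp
      · rw [show max (a + 1) c = max a c from by omega]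
        simp
termination_by a b => (b - a).toNat
decreasing_by all_goals omega

-- the bucket of key c holds exactly the increasing diagonal c
theorem pvBuckets_getD (nums : List (List Int)) (m n c : Int) :
    (pvBuckets nums m n).getD c [] = pvDiag nums c (max 0 c) (min m (c + n)) := by
  unfold pvBuckets
  have hcells :
      (PySem.List.pyRange 0 m 1).foldl (fun d i =>
        (PySem.List.pyRange 0 n 1).foldl (fun d j =>
          d.modify (i - j) [] (fun l => l ++ [pvGet nums i j])) d) PySem.Dict.empty =
      ((PySem.List.pyRange 0 m 1).flatMap
        (fun i => (PySem.List.pyRange 0 n 1).map (fun j => (i - j, pvGet nums i j)))).foldl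
        (fun d p => d.modify p.1 [] (fun l => l ++ [p.2])) PySem.Dict.empty := by
    rw [List.foldl_flatMap]
    congr 1
    funext d i
    rw [List.foldl_map]
  rw [hcells, PySem.Dict.getD_foldl_modify_append, PySem.Dict.getD_empty, List.nil_append,
    List.filter_flatMap, List.map_flatMap]
  have hrow : ∀ i : Int,
      (((PySem.List.pyRange 0 n 1).map (fun j => (i - j, pvGet nums i j))).filter
        (fun p => p.1 == c)).map (fun p => p.2) =
      (if c ≤ i ∧ i < c + n then [pvGet nums i (i - c)] else []) := by
    intro i
    rw [List.filter_map, List.map_map]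
    have hfc : ((PySem.List.pyRange 0 n 1).filter
        ((fun p => p.1 == c) ∘ fun j => (i - j, pvGet nums i j))) =
        (PySem.List.pyRange 0 n 1).filter (fun j => j == i - c) := by
      apply List.filter_congr
      intro j _
      show (i - j == c) = (j == i - c)
      by_cases hj : j = i - c
      · subst hj
        simp [show i - (i - c) = c from by ring]
      · rw [beq_eq_false_iff_ne.mpr (show i - j ≠ c from by omega),
          beq_eq_false_iff_ne.mpr hj]
    rw [hfc, filter_pyRange_eq_single]
    by_cases h : 0 ≤ i - c ∧ i - c < n
    · rw [if_pos h, if_pos (by omega)]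
      simp
    · rw [if_neg h, if_neg (by omega)]
      simp
  calc ((PySem.List.pyRange 0 m 1).flatMap fun i =>
          (((PySem.List.pyRange 0 n 1).map (fun j => (i - j, pvGet nums i j))).filter
            (fun p => p.1 == c)).map (fun p => p.2))
      = (PySem.List.pyRange 0 m 1).flatMap
          (fun i => if c ≤ i ∧ i < c + n then [pvGet nums i (i - c)] else []) :=
        List.flatMap_congr (fun i _ => hrow i)
    _ = pvDiag nums c (max 0 c) (min m (c + n)) := by
        rw [flatMap_if_eq_diag nums c (c + n) 0 m]

-- per-row: A's segment = B's segment
theorem pvSeg_eq (nums : List (List Int)) (m n r : Int) :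
    pvSegA nums m n r = pvSegB nums m n r := by
  unfold pvSegA pvSegB
  dsimp only
  set c : Int := r - (n - 1) with hc
  have hj : (if r + 1 ≤ m then (n : Int) - 1 else m + n - 1 - r - 1) =
      (if r + 1 ≤ m then r else m - 1) - c := by
    by_cases h : r + 1 ≤ m
    · rw [if_pos h, if_pos h]; omega
    · rw [if_neg h, if_neg h]; omega
  rw [hj, pvAwalk_eq_diag, pvBuckets_getD]
  have hhi : (if r + 1 ≤ m then r else m - 1) + 1 = min m (c + n) := by
    by_cases h : r + 1 ≤ m
    · rw [if_pos h]; omega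
    · rw [if_neg h]; omega
  rw [hhi, show max c 0 = max 0 c from by omega]
  rcases (by omega : r % 2 = 0 ∨ r % 2 = 1) with hp | hp
  · rw [if_pos hp, if_neg (by omega), List.reverse_reverse]
  · rw [if_neg (by omega), if_pos hp]

-- A's fold is the concatenation of its per-row segments
theorem printpath_flatMap (nums : List (List Int)) :
    printpath nums = (PySem.List.pyRange 0
        ((nums.length : Int) + ((PySem.List.pyGetD nums 0 []).length : Int) - 1) 1).flatMap
      (pvSegA nums (nums.length : Int) ((PySem.List.pyGetD nums 0 []).length : Int)) := by
  unfold printpath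
  dsimp only
  refine (List.foldl_ext _
      (fun res row => res ++ pvSegA nums (nums.length : Int)
        ((PySem.List.pyGetD nums 0 []).length : Int) row) [] ?_).trans
    ((PySem.List.foldl_append_eq_flatMap _ _ []).trans (List.nil_append _))
  intro res row _
  dsimp only
  rw [pvAwalk_append]
  unfold pvSegA
  dsimp only
  by_cases hp : row % 2 = 0
  · rw [if_pos hp, if_pos hp, List.take_left, List.drop_left]
  · rw [if_neg hp, if_neg hp]

-- B's fold is the concatenation of its per-row segments
theorem printpath_alt_flatMap (nums : List (List Int)) :
    printpath_alt nums = (PySem.List.pyRange 0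
        ((nums.length : Int) + ((PySem.List.pyGetD nums 0 []).length : Int) - 1) 1).flatMap
      (pvSegB nums (nums.length : Int) ((PySem.List.pyGetD nums 0 []).length : Int)) := by
  unfold printpath_alt
  dsimp only
  refine (List.foldl_ext _
      (fun res r => res ++ pvSegB nums (nums.length : Int)
        ((PySem.List.pyGetD nums 0 []).length : Int) r) [] ?_).trans
    ((PySem.List.foldl_append_eq_flatMap _ _ []).trans (List.nil_append _))
  intro res r _
  rfl

theorem printpath_eq_alt (nums : List (List Int)) : printpath nums = printpath_alt nums := by
  rw [printpath_flatMap, printpath_alt_flatMap]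
  exact List.flatMap_congr
    (fun r _ => pvSeg_eq nums _ _ r)

-- ===== VERDICT (by name: the statement is the Claim_ definition above) =====
theorem printpath_spec : Claim_equal_printpath := by
  intro nums _ _
  unfold Spec_printpath
  exact printpath_eq_alt nums
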